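-- pv_equiv track=rewrite | github.com/cbrown564-alt/dissertation-recursive | src/model_expansion.py | availability_note
-- ===== SOURCE A (Python) =====
-- def availability_note(pair_rows: list[dict[str, str]]) -> str:
--     errors = " ".join(row.get("error") or "" for row in pair_rows)
--     successes = sum(1 for row in pair_rows if row.get("status") == "success")
--     failures = len(pair_rows) - successes
--     if failures and successes == 0 and ("RESOURCE_EXHAUSTED" in errors or "quota" in errors.lower() or "429" in errors):
--         return "unavailable_due_to_quota"
--     if failures and successes and ("503" in errors or "UNAVAILABLE" in errors):
--         return "mostly_available_with_transient_503"
--     if failures: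
--         return "partially_available_with_failures"
--     return "available"
-- ===== SOURCE B (Python) =====
-- def availability_note(pair_rows: list[dict[str, str]]) -> str:
--     # One pass: count successes and keep two boolean flags instead of
--     # building and re-scanning a joined error string.
--     successes = 0
--     total = 0
--     has_quota = False
--     has_transient = False
--     for row in pair_rows:
--         total += 1
--         if row.get("status") == "success":
--             successes += 1
--         e = row.get("error") or ""
--         if not has_quota:
--             has_quota = "RESOURCE_EXHAUSTED" in e or "quota" in e.lower() or "429" in e
--         if not has_transient:
--             has_transient = "503" in e or "UNAVAILABLE" in e
--     failures = total - successes
--     if failures and successes == 0 and has_quota: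
--         return "unavailable_due_to_quota"
--     if failures and successes and has_transient:
--         return "mostly_available_with_transient_503"
--     if failures:
--         return "partially_available_with_failures"
--     return "available"
-- ===== Notes on version B (the rewrite author's own statement) =====
-- stated objective: simpler
-- what changed: B makes a single pass over the rows maintaining a success counter and two boolean flags, instead of A's three passes that build a space-joined error string and substring-search it (valid because the space separator cannot occur inside any searched token).
import Mathlib
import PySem

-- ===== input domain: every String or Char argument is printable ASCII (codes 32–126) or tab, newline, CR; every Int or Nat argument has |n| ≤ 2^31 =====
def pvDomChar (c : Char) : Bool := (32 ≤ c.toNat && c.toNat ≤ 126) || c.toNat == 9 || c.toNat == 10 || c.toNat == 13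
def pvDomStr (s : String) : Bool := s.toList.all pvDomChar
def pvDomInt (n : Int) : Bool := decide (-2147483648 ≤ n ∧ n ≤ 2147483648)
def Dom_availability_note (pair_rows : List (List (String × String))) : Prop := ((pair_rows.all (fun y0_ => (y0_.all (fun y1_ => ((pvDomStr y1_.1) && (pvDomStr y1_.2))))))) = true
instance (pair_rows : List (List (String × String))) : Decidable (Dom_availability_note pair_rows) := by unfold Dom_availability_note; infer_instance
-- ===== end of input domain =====

-- B replaces A's three passes (build a space-joined error string, then substring-search it)
-- by a single loop keeping a success counter and two boolean flags; objective: simpler.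

-- ===== PORT A =====
-- `row.get("error") or ""` is (get? row "error").getD "": None ↦ "" and the falsy "" ↦ "" coincide.
def availability_note (pair_rows : List (List (String × String))) : String :=
  let errors := PySem.Str.join " " (pair_rows.map (fun row => (PySem.Dict.get? (⟨row⟩ : PySem.Dict String String) "error").getD ""))
  let successes : Int := (pair_rows.map (fun row => if PySem.Dict.get? (⟨row⟩ : PySem.Dict String String) "status" = some "success" then (1 : Int) else 0)).sum
  let failures : Int := (pair_rows.length : Int) - successes
  if failures ≠ 0 ∧ successes = 0 ∧ (PySem.Str.isIn "RESOURCE_EXHAUSTED" errors || PySem.Str.isIn "quota" (PySem.Str.lower errors) || PySem.Str.isIn "429" errors) then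
    "unavailable_due_to_quota"
  else if failures ≠ 0 ∧ successes ≠ 0 ∧ (PySem.Str.isIn "503" errors || PySem.Str.isIn "UNAVAILABLE" errors) then
    "mostly_available_with_transient_503"
  else if failures ≠ 0 then "partially_available_with_failures"
  else "available"

-- ===== PORT B =====
-- the body of Source B's for-loop: state = (successes, total, has_quota, has_transient)
def pvStepB (st : Int × Int × Bool × Bool) (row : List (String × String)) : Int × Int × Bool × Bool :=
  let e := (PySem.Dict.get? (⟨row⟩ : PySem.Dict String String) "error").getD ""
  ((if PySem.Dict.get? (⟨row⟩ : PySem.Dict String String) "status" = some "success" then st.1 + 1 else st.1),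
   st.2.1 + 1,
   (st.2.2.1 || (PySem.Str.isIn "RESOURCE_EXHAUSTED" e || PySem.Str.isIn "quota" (PySem.Str.lower e) || PySem.Str.isIn "429" e)),
   (st.2.2.2 || (PySem.Str.isIn "503" e || PySem.Str.isIn "UNAVAILABLE" e)))

def availability_note_alt (pair_rows : List (List (String × String))) : String :=
  let st := pair_rows.foldl pvStepB (0, 0, false, false)
  let failures : Int := st.2.1 - st.1
  if failures ≠ 0 ∧ st.1 = 0 ∧ st.2.2.1 then "unavailable_due_to_quota"
  else if failures ≠ 0 ∧ st.1 ≠ 0 ∧ st.2.2.2 then "mostly_available_with_transient_503"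
  else if failures ≠ 0 then "partially_available_with_failures"
  else "available"

-- ===== PRECONDITION & SPEC =====
def Spec_availability_note (pair_rows : List (List (String × String))) (out : String) : Prop := out = availability_note_alt pair_rows
instance (pair_rows : List (List (String × String))) (out : String) : Decidable (Spec_availability_note pair_rows out) := by unfold Spec_availability_note; infer_instance

-- ===== CLAIM (what is proved, stated in full; the proofs are below) =====
def Claim_equal_availability_note : Prop := ∀ (pair_rows : List (List (String × String))), Dom_availability_note pair_rows → Spec_availability_note pair_rows (availability_note pair_rows)

-- ===== LEMMAS AND PROOFS =====

-- the per-row quantities B maintains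
def pvErr (row : List (String × String)) : String := (PySem.Dict.get? (⟨row⟩ : PySem.Dict String String) "error").getD ""
def pvRowQ (row : List (String × String)) : Bool :=
  PySem.Str.isIn "RESOURCE_EXHAUSTED" (pvErr row) || PySem.Str.isIn "quota" (PySem.Str.lower (pvErr row)) || PySem.Str.isIn "429" (pvErr row)
def pvRowT (row : List (String × String)) : Bool :=
  PySem.Str.isIn "503" (pvErr row) || PySem.Str.isIn "UNAVAILABLE" (pvErr row)
def pvSucc (rows : List (List (String × String))) : Int :=
  (rows.map (fun row => if PySem.Dict.get? (⟨row⟩ : PySem.Dict String String) "status" = some "success" then (1 : Int) else 0)).sum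

-- B's fold computes the counter, the length and the two any-flags
theorem pvFoldB_spec (rows : List (List (String × String))) (s t : Int) (q u : Bool) :
    rows.foldl pvStepB (s, t, q, u) =
      (s + pvSucc rows, t + rows.length, q || rows.any pvRowQ, u || rows.any pvRowT) := by
  induction rows generalizing s t q u with
  | nil => simp [pvSucc]
  | cons r rest ih =>
    simp only [List.foldl_cons, pvStepB, ih, List.any_cons, List.length_cons, Prod.mk.injEq]
    refine ⟨?_, ?_, ?_, ?_⟩
    · simp only [pvSucc, List.map_cons, List.sum_cons]
      split_ifs <;> ring
    · push_cast; ring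
    · simp only [pvRowQ, pvErr, Bool.or_assoc]
    · simp only [pvRowT, pvErr, Bool.or_assoc]

-- an occurrence of a space-free pattern in `a ++ ' ' :: b` lies entirely in a or in b
theorem pvInfix_split (p a b : List Char) (hsp : ' ' ∉ p) :
    p <:+: a ++ ' ' :: b ↔ p <:+: a ∨ p <:+: b := by
  constructor
  · rintro ⟨s, t, h⟩
    by_cases h1 : s.length + p.length ≤ a.length
    · left
      have hpre : s ++ p <+: a := by
        have hw : s ++ p <+: a ++ ' ' :: b := ⟨t, by simpa [List.append_assoc] using h⟩
        exact List.prefix_of_prefix_length_le hw (List.prefix_append a (' ' :: b))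
          (by simpa using h1)
      obtain ⟨t', ht⟩ := hpre
      exact ⟨s, t', by simpa [List.append_assoc] using ht⟩
    · by_cases h2 : a.length + 1 ≤ s.length
      · right
        have hsuf : p ++ t <:+ b := by
          have hw : p ++ t <:+ (a ++ [' ']) ++ b := ⟨s, by simpa [List.append_assoc] using h⟩
          have hlen : (p ++ t).length ≤ b.length := by
            have htot := congrArg List.length h
            simp [List.length_append] at htot ⊢
            omega
          exact List.suffix_of_suffix_length_le hw (List.suffix_append (a ++ [' ']) b) hlen
        obtain ⟨s', hs⟩ := hsuf
        exact ⟨s', t, by simpa [List.append_assoc] using hs⟩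
      · exfalso
        apply hsp
        have hlt : a.length - s.length < p.length := by omega
        have hle : s.length ≤ a.length := by omega
        have hidx : a.length < (s ++ p ++ t).length := by
          have htot := congrArg List.length h
          simp [List.length_append] at htot ⊢
          omega
        have hval : (s ++ p ++ t)[a.length]'hidx = ' ' := by
          rw [List.getElem_of_eq h]
          rw [List.getElem_append_right (le_refl a.length)]
          simp
        have heq : (s ++ p ++ t)[a.length]'hidx = p[a.length - s.length]'hlt := by
          rw [List.getElem_of_eq (List.append_assoc s p t)]
          rw [List.getElem_append_right hle]
          rw [List.getElem_append_left hlt]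
        have : p[a.length - s.length]'hlt = ' ' := heq.symm.trans hval
        exact this ▸ List.getElem_mem hlt
  · rintro (h | h)
    · exact h.trans (List.prefix_append a (' ' :: b)).isInfix
    · exact h.trans ((List.suffix_cons ' ' b).trans (List.suffix_append a (' ' :: b))).isInfix

-- a space-free nonempty pattern occurs in the space-joined list iff it occurs in some piece
theorem pvInfix_join (p : List Char) (es : List (List Char)) (hne : p ≠ []) (hsp : ' ' ∉ p) :
    p <:+: PySem.Chars.join [' '] es ↔ ∃ e ∈ es, p <:+: e := by
  induction es with
  | nil => simp [PySem.Chars.join, List.intercalate, hne]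
  | cons e rest ih =>
    cases rest with
    | nil => simp [PySem.Chars.join_singleton]
    | cons e2 rest2 =>
      rw [PySem.Chars.join_cons_cons]
      have hshape : e ++ [' '] ++ PySem.Chars.join [' '] (e2 :: rest2)
          = e ++ ' ' :: PySem.Chars.join [' '] (e2 :: rest2) := by simp
      rw [hshape, pvInfix_split p _ _ hsp, ih]
      simp

-- lower distributes over the space-join (lowerChar ' ' = ' ')
theorem pvLower_join (es : List (List Char)) :
    PySem.Chars.lower (PySem.Chars.join [' '] es) = PySem.Chars.join [' '] (es.map PySem.Chars.lower) := by
  induction es with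
  | nil => rfl
  | cons e rest ih =>
    cases rest with
    | nil => simp [PySem.Chars.join_singleton]
    | cons e2 rest2 =>
      rw [PySem.Chars.join_cons_cons, List.map_cons, List.map_cons, PySem.Chars.join_cons_cons]
      simp only [PySem.Chars.lower, List.map_append] at ih ⊢
      rw [ih]
      rfl

-- string-level: pattern-in-joined-errors = some row's error contains the pattern
theorem pvIsIn_join (p : String) (parts : List String) (hne : p.toList ≠ []) (hsp : ' ' ∉ p.toList) :
    PySem.Str.isIn p (PySem.Str.join " " parts) = parts.any (fun s => PySem.Str.isIn p s) := by
  rw [Bool.eq_iff_iff, PySem.Str.isIn_iff_infix, PySem.Str.toList_join]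
  have hsep : (" " : String).toList = [' '] := rfl
  rw [hsep, pvInfix_join p.toList _ hne hsp, List.any_eq_true]
  constructor
  · rintro ⟨e, he, h⟩
    obtain ⟨s, hs, rfl⟩ := List.mem_map.mp he
    exact ⟨s, hs, (PySem.Str.isIn_iff_infix p s).mpr h⟩
  · rintro ⟨s, hs, h⟩
    exact ⟨s.toList, List.mem_map.mpr ⟨s, hs, rfl⟩, (PySem.Str.isIn_iff_infix p s).mp h⟩

theorem pvIsIn_lower_join (p : String) (parts : List String) (hne : p.toList ≠ []) (hsp : ' ' ∉ p.toList) :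
    PySem.Str.isIn p (PySem.Str.lower (PySem.Str.join " " parts))
      = parts.any (fun s => PySem.Str.isIn p (PySem.Str.lower s)) := by
  rw [Bool.eq_iff_iff, PySem.Str.isIn_iff_infix, PySem.Str.toList_lower, PySem.Str.toList_join]
  have hsep : (" " : String).toList = [' '] := rfl
  rw [hsep, pvLower_join, pvInfix_join p.toList _ hne hsp, List.any_eq_true]
  constructor
  · rintro ⟨e, he, h⟩
    obtain ⟨e', he', rfl⟩ := List.mem_map.mp he
    obtain ⟨s, hs, rfl⟩ := List.mem_map.mp he'
    refine ⟨s, hs, ?_⟩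
    rw [PySem.Str.isIn_iff_infix, PySem.Str.toList_lower]
    exact h
  · rintro ⟨s, hs, h⟩
    rw [PySem.Str.isIn_iff_infix, PySem.Str.toList_lower] at h
    exact ⟨PySem.Chars.lower s.toList,
      List.mem_map.mpr ⟨s.toList, List.mem_map.mpr ⟨s, hs, rfl⟩, rfl⟩, h⟩

-- any of a disjunction splits
theorem pvAny_or {α : Type} (l : List α) (f g : α → Bool) :
    l.any (fun x => f x || g x) = (l.any f || l.any g) := by
  induction l with
  | nil => rfl
  | cons x t ih =>
    simp only [List.any_cons, ih]
    cases f x <;> cases g x <;> simp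

theorem pvCondQ (rows : List (List (String × String))) :
    (PySem.Str.isIn "RESOURCE_EXHAUSTED" (PySem.Str.join " " (rows.map pvErr))
      || PySem.Str.isIn "quota" (PySem.Str.lower (PySem.Str.join " " (rows.map pvErr)))
      || PySem.Str.isIn "429" (PySem.Str.join " " (rows.map pvErr))) = rows.any pvRowQ := by
  rw [pvIsIn_join _ _ (by decide) (by decide), pvIsIn_lower_join _ _ (by decide) (by decide),
    pvIsIn_join "429" _ (by decide) (by decide)]
  simp only [List.any_map, Function.comp_def, ← pvAny_or]
  rfl

theorem pvCondT (rows : List (List (String × String))) :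
    (PySem.Str.isIn "503" (PySem.Str.join " " (rows.map pvErr))
      || PySem.Str.isIn "UNAVAILABLE" (PySem.Str.join " " (rows.map pvErr))) = rows.any pvRowT := by
  rw [pvIsIn_join _ _ (by decide) (by decide), pvIsIn_join "UNAVAILABLE" _ (by decide) (by decide)]
  simp only [List.any_map, Function.comp_def, ← pvAny_or]
  rfl

-- ===== VERDICT (by name: the statement is the Claim_ definition above) =====
theorem availability_note_spec : Claim_equal_availability_note := by
  intro pair_rows _
  unfold Spec_availability_note availability_note availability_note_alt
  simp only [pvFoldB_spec, zero_add, Bool.false_or,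
    show (fun row : List (String × String) => (PySem.Dict.get? (⟨row⟩ : PySem.Dict String String) "error").getD "") = pvErr from rfl,
    pvSucc, pvCondQ, pvCondT]
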